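-- pv_equiv track=rewrite | github.com/e-likoudi/scripts_v2 | new_protocol_tools/merge_stages.py | merge_similar_steps
-- ===== SOURCE A (Python) =====
-- def merge_similar_steps(stage_dict):
--     merged = {}
--     order_keys = []
--
--     for s in stage_dict:
--         stage = s.get('stage', '')
--         reason = s.get('reason', '')
--         specific = s.get('specific_step', '')
--
--         key = (stage, specific)
--
--         if key not in merged:
--             order_keys.append(key)
--             merged[key] = {
--                 'stage': stage,
--                 'specific_step': specific,
--                 'reasons': [reason]
--             }
--         elif reason not in merged[key]['reasons']:
--             merged[key]['reasons'].append(reason)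
--
--     stage_order = [
--         'Undifferentiated cells',
--         'Differentiation Process',
--         'Differentiated cells'
--     ]
--
--     merged_list = [
--         {
--             'stage': merged[key]['stage'],
--             'specific_step': merged[key]['specific_step'],
--             'reason': ' '.join(merged[key]['reasons'])
--         }
--         for key in order_keys
--     ]
--
--     # Sort using the custom order
--     merged_list_sorted = sorted(
--         merged_list,
--         key=lambda x: stage_order.index(x['stage']) if x['stage'] in stage_order else len(stage_order)
--     )
--
--     return merged_list_sorted
-- ===== SOURCE B (Python) =====
-- def merge_similar_steps(stage_dict):
--     stage_order = [
--         'Undifferentiated cells',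
--         'Differentiation Process',
--         'Differentiated cells'
--     ]
--
--     def prio(stage):
--         return stage_order.index(stage) if stage in stage_order else len(stage_order)
--
--     items = [(s.get('stage', ''), s.get('specific_step', ''), s.get('reason', ''))
--              for s in stage_dict]
--
--     out = []
--     # Bucket passes by stage priority (no sort): priorities are 0..len(stage_order).
--     for p in range(len(stage_order) + 1):
--         bucket = [t for t in items if prio(t[0]) == p]
--         keys = list(dict.fromkeys((st, sp) for (st, sp, _) in bucket))
--         for (st, sp) in keys:
--             reasons = list(dict.fromkeys(r for (st2, sp2, r) in bucket
--                                          if (st2, sp2) == (st, sp)))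
--             out.append({
--                 'stage': st,
--                 'specific_step': sp,
--                 'reason': ' '.join(reasons)
--             })
--     return out
-- ===== Notes on version B (the rewrite author's own statement) =====
-- stated objective: alternative
-- what changed: B replaces A's incremental dict+order_keys grouping followed by a final key-based sort with sort-free bucket passes: for each of the four stage priorities it filters the items, collects first-occurrence (stage, specific_step) keys via dict.fromkeys, and gathers each key's deduplicated reasons by a direct scan of the bucket.
import Mathlib
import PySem

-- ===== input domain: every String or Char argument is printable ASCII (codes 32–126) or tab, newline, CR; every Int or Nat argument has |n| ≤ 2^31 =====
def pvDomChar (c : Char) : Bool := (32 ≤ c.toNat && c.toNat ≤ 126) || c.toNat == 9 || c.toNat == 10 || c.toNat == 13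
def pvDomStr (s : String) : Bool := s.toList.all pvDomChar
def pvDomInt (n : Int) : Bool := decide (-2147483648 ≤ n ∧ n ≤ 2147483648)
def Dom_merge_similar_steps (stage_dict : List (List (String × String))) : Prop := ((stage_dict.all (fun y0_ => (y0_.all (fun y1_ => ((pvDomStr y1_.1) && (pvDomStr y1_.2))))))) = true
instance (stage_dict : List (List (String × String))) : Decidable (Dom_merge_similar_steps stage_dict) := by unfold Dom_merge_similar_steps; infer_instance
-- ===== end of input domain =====

-- B replaces A's group-then-comparison-sort by bucket passes over the four stage priorities
-- (no sort at all) with declarative per-key grouping; objective: alternative decomposition.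


-- ===== PORT A =====
-- A-side helper: the body of A's 'for s in stage_dict' loop, acting on the state (merged, order_keys)
def pvAStep (acc : PySem.Dict (String × String) (String × String × List String) × List (String × String))
    (s : List (String × String)) :
    PySem.Dict (String × String) (String × String × List String) × List (String × String) :=
  let merged := acc.1
  let order_keys := acc.2
  let stage := (PySem.Dict.mk s).getD "stage" ""
  let reason := (PySem.Dict.mk s).getD "reason" ""
  let specific := (PySem.Dict.mk s).getD "specific_step" ""
  let key := (stage, specific)
  if merged.contains key = false then
    (merged.insert key (stage, specific, [reason]), order_keys ++ [key])
  else if reason ∈ (merged.getD key ("", "", [])).2.2 then acc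
  else (merged.insert key ((merged.getD key ("", "", [])).1, (merged.getD key ("", "", [])).2.1,
          (merged.getD key ("", "", [])).2.2 ++ [reason]), order_keys)

def merge_similar_steps (stage_dict : List (List (String × String))) : List (List (String × String)) :=
  let st := stage_dict.foldl pvAStep (PySem.Dict.empty, [])
  let merged := st.1
  let order_keys := st.2
  let stage_order := ["Undifferentiated cells", "Differentiation Process", "Differentiated cells"]
  let merged_list := order_keys.map (fun key =>
    let r := merged.getD key ("", "", [])
    [("stage", r.1), ("specific_step", r.2.1), ("reason", PySem.Str.join " " r.2.2)])
  PySem.List.sorted merged_list (fun x =>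
    let stg := (PySem.Dict.mk x).getD "stage" ""
    if stage_order.contains stg then ((PySem.List.index? stage_order stg).getD 0 : Int)
    else PySem.List.len stage_order) false

-- ===== PORT B =====
def pvStageOrder : List String :=
  ["Undifferentiated cells", "Differentiation Process", "Differentiated cells"]

def pvPrio (stg : String) : Int :=
  if pvStageOrder.contains stg then ((PySem.List.index? pvStageOrder stg).getD 0 : Int)
  else PySem.List.len pvStageOrder

def merge_similar_steps_alt (stage_dict : List (List (String × String))) : List (List (String × String)) :=
  let items := stage_dict.map (fun s =>
    ((PySem.Dict.mk s).getD "stage" "", (PySem.Dict.mk s).getD "specific_step" "",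
     (PySem.Dict.mk s).getD "reason" ""))
  (PySem.List.pyRange 0 (PySem.List.len pvStageOrder + 1) 1).foldl (fun out p =>
    let bucket := items.filter (fun t => pvPrio t.1 == p)
    let keys := PySem.List.dedup (bucket.map (fun t => (t.1, t.2.1)))
    keys.foldl (fun out k =>
      let reasons := PySem.List.dedup ((bucket.filter (fun t => (t.1, t.2.1) == k)).map (fun t => t.2.2))
      out ++ [[("stage", k.1), ("specific_step", k.2), ("reason", PySem.Str.join " " reasons)]]) out) []

-- ===== PRECONDITION & SPEC =====
def Spec_merge_similar_steps (stage_dict : List (List (String × String))) (out : List (List (String × String))) : Prop := out = merge_similar_steps_alt stage_dict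
instance (stage_dict : List (List (String × String))) (out : List (List (String × String))) : Decidable (Spec_merge_similar_steps stage_dict out) := by unfold Spec_merge_similar_steps; infer_instance

-- ===== CLAIM (what is proved, stated in full; the proofs are below) =====
def Claim_equal_merge_similar_steps : Prop := ∀ (stage_dict : List (List (String × String))), Dom_merge_similar_steps stage_dict → Spec_merge_similar_steps stage_dict (merge_similar_steps stage_dict)

-- ===== LEMMAS AND PROOFS =====

-- proof-side abbreviations
def pvItem (s : List (String × String)) : String × String × String :=
  ((PySem.Dict.mk s).getD "stage" "", (PySem.Dict.mk s).getD "specific_step" "",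
   (PySem.Dict.mk s).getD "reason" "")

def pvKey (t : String × String × String) : String × String := (t.1, t.2.1)

def pvRec (k : String × String) (rs : List String) : List (String × String) :=
  [("stage", k.1), ("specific_step", k.2), ("reason", PySem.Str.join " " rs)]

def pvReasons (ys : List (String × String × String)) (k : String × String) : List String :=
  PySem.List.dedup ((ys.filter (fun t => pvKey t == k)).map (fun t => t.2.2))

def pvGroups (ys : List (String × String × String)) : List (List (String × String)) :=
  (PySem.List.dedup (ys.map pvKey)).map (fun k => pvRec k (pvReasons ys k))

def pvKappa (x : List (String × String)) : Int := pvPrio ((PySem.Dict.mk x).getD "stage" "")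

lemma pvPrio_cases (stg : String) :
    pvPrio stg = (if stg = "Undifferentiated cells" then 0
      else if stg = "Differentiation Process" then 1
      else if stg = "Differentiated cells" then 2 else 3) := by
  by_cases h1 : stg = "Undifferentiated cells"
  · subst h1; decide
  · by_cases h2 : stg = "Differentiation Process"
    · subst h2; decide
    · by_cases h3 : stg = "Differentiated cells"
      · subst h3; decide
      · rw [if_neg h1, if_neg h2, if_neg h3]
        have hmem : stg ∉ pvStageOrder := by
          intro hmem
          simp [pvStageOrder] at hmem
          rcases hmem with h | h | h
          exacts [h1 h, h2 h, h3 h]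
        have hnm : pvStageOrder.contains stg = false :=
          Bool.eq_false_iff.mpr (fun hc => hmem (List.contains_iff_mem.mp hc))
        rw [pvPrio, if_neg (fun hc => hmem (List.contains_iff_mem.mp hc))]
        rfl

lemma pvPrio_bounds (stg : String) : 0 ≤ pvPrio stg ∧ pvPrio stg ≤ 3 := by
  rw [pvPrio_cases]; split_ifs <;> omega

lemma pvKappa_rec (k : String × String) (rs : List String) : pvKappa (pvRec k rs) = pvPrio k.1 := by
  simp [pvKappa, pvRec, PySem.Dict.getD_eq_get?_getD, PySem.Dict.get?_mk_cons]

lemma pv_mem_dedup {α : Type} [BEq α] [LawfulBEq α] (l : List α) (x : α) :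
    x ∈ PySem.List.dedup l ↔ x ∈ l := by
  rw [PySem.List.dedup_eq_ofList]; exact PySem.Set.mem_ofList l x

-- dedup (= PySem.Set.ofList, first occurrences) lemmas
lemma pv_dedup_append {α : Type} [BEq α] [LawfulBEq α] (l : List α) (x : α) :
    PySem.List.dedup (l ++ [x]) =
      (if x ∈ l then PySem.List.dedup l else PySem.List.dedup l ++ [x]) := by
  by_cases hx : x ∈ l <;>
    simp [PySem.List.dedup_eq_ofList, PySem.Set.ofList_append_singleton, PySem.Set.add,
      PySem.Set.mem_ofList, hx]

lemma pv_dedup_filter {α : Type} [BEq α] [LawfulBEq α] (l : List α) (q : α → Bool) :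
    PySem.List.dedup (l.filter q) = (PySem.List.dedup l).filter q := by
  induction l using List.reverseRecOn with
  | nil => rfl
  | append_singleton l x ih =>
      rw [List.filter_append, pv_dedup_append l x]
      by_cases hx : x ∈ l
      · rw [if_pos hx]
        by_cases hq : q x = true
        · rw [show List.filter q [x] = [x] from by simp [hq], pv_dedup_append,
            if_pos (List.mem_filter.mpr ⟨hx, hq⟩), ih]
        · rw [show List.filter q [x] = ([] : List α) from by simp [hq], List.append_nil, ih]
      · rw [if_neg hx, List.filter_append]
        by_cases hq : q x = true
        · rw [show List.filter q [x] = [x] from by simp [hq], pv_dedup_append,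
            if_neg (fun hc => hx (List.mem_filter.mp hc).1), ih]
        · rw [show List.filter q [x] = ([] : List α) from by simp [hq], List.append_nil,
            List.append_nil, ih]

lemma pvReasons_append (ys : List (String × String × String)) (t : String × String × String)
    (k : String × String) :
    pvReasons (ys ++ [t]) k =
      (if k = pvKey t ∧ t.2.2 ∉ pvReasons ys k then pvReasons ys k ++ [t.2.2] else pvReasons ys k) := by
  unfold pvReasons
  rw [List.filter_append]
  by_cases hk : k = pvKey t
  · have hkt : (pvKey t == k) = true := by simp [hk]
    simp only [List.filter_cons, hkt, if_true, List.filter_nil, List.map_append, List.map_cons,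
      List.map_nil]
    rw [pv_dedup_append]
    by_cases hr : t.2.2 ∈ PySem.List.dedup ((ys.filter (fun t => pvKey t == k)).map (fun t => t.2.2))
    · rw [if_pos (by simpa [PySem.List.dedup_eq_ofList, PySem.Set.mem_ofList] using hr),
        if_neg (fun hc => hc.2 hr)]
    · rw [if_neg (by simpa [PySem.List.dedup_eq_ofList, PySem.Set.mem_ofList] using hr),
        if_pos ⟨hk, hr⟩]
  · have hkt : (pvKey t == k) = false := by simpa using Ne.symm hk
    rw [if_neg (fun hc => hk hc.1)]
    simp [List.filter_cons, hkt]

lemma pvReasons_of_not_mem (ys : List (String × String × String)) (k : String × String)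
    (h : k ∉ ys.map pvKey) : pvReasons ys k = [] := by
  unfold pvReasons
  have hnil : ys.filter (fun t => pvKey t == k) = [] := by
    rw [List.filter_eq_nil_iff]
    intro t ht hc
    exact h (List.mem_map.mpr ⟨t, ht, by simpa using hc⟩)
  simp [hnil]

-- A's loop body, re-expressed on an item triple
lemma pvAStep_eq (acc : PySem.Dict (String × String) (String × String × List String) × List (String × String))
    (t : String × String × String) :
    pvAStep acc [("stage", t.1), ("specific_step", t.2.1), ("reason", t.2.2)] =
      (if acc.1.contains (pvKey t) = false then
        (acc.1.insert (pvKey t) (t.1, t.2.1, [t.2.2]), acc.2 ++ [pvKey t])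
      else if t.2.2 ∈ (acc.1.getD (pvKey t) ("", "", [])).2.2 then acc
      else (acc.1.insert (pvKey t) ((acc.1.getD (pvKey t) ("", "", [])).1,
              (acc.1.getD (pvKey t) ("", "", [])).2.1,
              (acc.1.getD (pvKey t) ("", "", [])).2.2 ++ [t.2.2]), acc.2)) := by
  simp [pvAStep, pvKey, PySem.Dict.getD_eq_get?_getD, PySem.Dict.get?_mk_cons]

-- the invariant of A's loop
lemma pvA_fold (zs : List (String × String × String)) :
    (zs.foldl (fun acc t => pvAStep acc [("stage", t.1), ("specific_step", t.2.1), ("reason", t.2.2)])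
        (PySem.Dict.empty, [])).2 = PySem.List.dedup (zs.map pvKey) ∧
    ∀ k, (zs.foldl (fun acc t => pvAStep acc [("stage", t.1), ("specific_step", t.2.1), ("reason", t.2.2)])
        (PySem.Dict.empty, [])).1.get? k =
      (if k ∈ zs.map pvKey then some (k.1, k.2, pvReasons zs k) else none) := by
  induction zs using List.reverseRecOn with
  | nil =>
      refine ⟨rfl, fun k => ?_⟩
      simp [PySem.Dict.get?_empty]
  | append_singleton zs t ih =>
      obtain ⟨ih1, ih2⟩ := ih
      rw [List.foldl_append, List.foldl_cons, List.foldl_nil, pvAStep_eq]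
      have hmapp : List.map pvKey (zs ++ [t]) = List.map pvKey zs ++ [pvKey t] := by simp
      have hcont : (zs.foldl (fun acc t => pvAStep acc [("stage", t.1), ("specific_step", t.2.1), ("reason", t.2.2)])
          (PySem.Dict.empty, [])).1.contains (pvKey t)
          = decide (pvKey t ∈ zs.map pvKey) := by
        rw [PySem.Dict.contains_eq_isSome_get?, ih2 (pvKey t)]
        by_cases hm : pvKey t ∈ zs.map pvKey <;> simp [hm]
      by_cases hm : pvKey t ∈ zs.map pvKey
      · -- key already present
        have hct : (zs.foldl (fun acc t => pvAStep acc [("stage", t.1), ("specific_step", t.2.1), ("reason", t.2.2)])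
            (PySem.Dict.empty, [])).1.contains (pvKey t) = true := by
          rw [hcont]; exact decide_eq_true hm
        rw [hct, if_neg (by simp)]
        have hget := ih2 (pvKey t)
        rw [if_pos hm] at hget
        have hgetD : ((zs.foldl (fun acc t => pvAStep acc [("stage", t.1), ("specific_step", t.2.1), ("reason", t.2.2)])
            (PySem.Dict.empty, [])).1.getD (pvKey t) ("", "", []))
            = ((pvKey t).1, (pvKey t).2, pvReasons zs (pvKey t)) := by
          rw [PySem.Dict.getD_eq_get?_getD, hget]; rfl
        rw [hgetD]
        by_cases hr : t.2.2 ∈ pvReasons zs (pvKey t)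
        · rw [if_pos hr]
          refine ⟨?_, fun k => ?_⟩
          · rw [ih1, hmapp, pv_dedup_append, if_pos hm]
          · rw [ih2 k, hmapp, pvReasons_append]
            by_cases hkk : k = pvKey t
            · subst hkk
              rw [if_pos hm, if_pos (List.mem_append_left _ hm),
                if_neg (show ¬(pvKey t = pvKey t ∧ t.2.2 ∉ pvReasons zs (pvKey t)) from fun hc => hc.2 hr)]
            · by_cases hk2 : k ∈ List.map pvKey zs
              · rw [if_pos hk2, if_pos (List.mem_append_left _ hk2),
                  if_neg (show ¬(k = pvKey t ∧ t.2.2 ∉ pvReasons zs k) from fun hc => hkk hc.1)]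
              · rw [if_neg hk2, if_neg (show ¬(k ∈ List.map pvKey zs ++ [pvKey t]) from
                  fun hc => (List.mem_append.mp hc).elim hk2 (fun h => hkk (by simpa using h)))]
        · rw [if_neg hr]
          refine ⟨?_, fun k => ?_⟩
          · rw [ih1, hmapp, pv_dedup_append, if_pos hm]
          · rw [PySem.Dict.get?_insert, hmapp, pvReasons_append]
            by_cases hkk : k = pvKey t
            · subst hkk
              rw [if_pos (show pvKey t = pvKey t from rfl), if_pos (List.mem_append_left _ hm),
                if_pos (show pvKey t = pvKey t ∧ t.2.2 ∉ pvReasons zs (pvKey t) from ⟨rfl, hr⟩)]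
            · rw [if_neg hkk, ih2 k]
              by_cases hk2 : k ∈ List.map pvKey zs
              · rw [if_pos hk2, if_pos (List.mem_append_left _ hk2),
                  if_neg (show ¬(k = pvKey t ∧ t.2.2 ∉ pvReasons zs k) from fun hc => hkk hc.1)]
              · rw [if_neg hk2, if_neg (show ¬(k ∈ List.map pvKey zs ++ [pvKey t]) from
                  fun hc => (List.mem_append.mp hc).elim hk2 (fun h => hkk (by simpa using h)))]
      · -- fresh key
        have hcf : (zs.foldl (fun acc t => pvAStep acc [("stage", t.1), ("specific_step", t.2.1), ("reason", t.2.2)])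
            (PySem.Dict.empty, [])).1.contains (pvKey t) = false := by
          rw [hcont]; exact decide_eq_false hm
        rw [hcf, if_pos rfl]
        refine ⟨?_, fun k => ?_⟩
        · rw [ih1, hmapp, pv_dedup_append, if_neg hm]
        · rw [PySem.Dict.get?_insert, hmapp, pvReasons_append]
          by_cases hkk : k = pvKey t
          · subst hkk
            rw [if_pos (show pvKey t = pvKey t from rfl),
              if_pos (show pvKey t ∈ List.map pvKey zs ++ [pvKey t] from
                List.mem_append_right _ (by simp)),
              if_pos (show pvKey t = pvKey t ∧ t.2.2 ∉ pvReasons zs (pvKey t) from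
                ⟨rfl, by simp [pvReasons_of_not_mem zs _ hm]⟩),
              pvReasons_of_not_mem zs _ hm]
            simp [pvKey]
          · rw [if_neg hkk, ih2 k,
              if_neg (show ¬(k = pvKey t ∧ t.2.2 ∉ pvReasons zs k) from fun hc => hkk hc.1)]
            by_cases hk2 : k ∈ List.map pvKey zs
            · rw [if_pos hk2, if_pos (List.mem_append_left _ hk2)]
            · rw [if_neg hk2, if_neg (show ¬(k ∈ List.map pvKey zs ++ [pvKey t]) from
                fun hc => (List.mem_append.mp hc).elim hk2 (fun h => hkk (by simpa using h)))]

lemma pvA_char (xs : List (List (String × String))) :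
    merge_similar_steps xs = PySem.List.sorted (pvGroups (xs.map pvItem)) pvKappa false := by
  have hfold : xs.foldl pvAStep (PySem.Dict.empty, [])
      = (xs.map pvItem).foldl (fun acc t => pvAStep acc [("stage", t.1), ("specific_step", t.2.1), ("reason", t.2.2)])
        (PySem.Dict.empty, []) := by
    rw [List.foldl_map]
    refine List.foldl_ext _ _ _ (fun acc s _ => ?_)
    simp [pvAStep, pvItem, PySem.Dict.getD_eq_get?_getD, PySem.Dict.get?_mk_cons]
  obtain ⟨h1, h2⟩ := pvA_fold (xs.map pvItem)
  show PySem.List.sorted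
      ((xs.foldl pvAStep (PySem.Dict.empty, [])).2.map (fun key =>
        [("stage", ((xs.foldl pvAStep (PySem.Dict.empty, [])).1.getD key ("", "", [])).1),
         ("specific_step", ((xs.foldl pvAStep (PySem.Dict.empty, [])).1.getD key ("", "", [])).2.1),
         ("reason", PySem.Str.join " " ((xs.foldl pvAStep (PySem.Dict.empty, [])).1.getD key ("", "", [])).2.2)]))
      (fun x =>
        if (["Undifferentiated cells", "Differentiation Process", "Differentiated cells"] : List String).contains
            ((PySem.Dict.mk x).getD "stage" "") then
          ((PySem.List.index? ["Undifferentiated cells", "Differentiation Process", "Differentiated cells"]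
            ((PySem.Dict.mk x).getD "stage" "")).getD 0 : Int)
        else PySem.List.len ["Undifferentiated cells", "Differentiation Process", "Differentiated cells"]) false
    = PySem.List.sorted (pvGroups (xs.map pvItem)) pvKappa false
  rw [hfold, h1]
  have hmap : (PySem.List.dedup ((xs.map pvItem).map pvKey)).map (fun key =>
        [("stage", (((xs.map pvItem).foldl (fun acc t => pvAStep acc [("stage", t.1), ("specific_step", t.2.1), ("reason", t.2.2)])
          (PySem.Dict.empty, [])).1.getD key ("", "", [])).1),
         ("specific_step", (((xs.map pvItem).foldl (fun acc t => pvAStep acc [("stage", t.1), ("specific_step", t.2.1), ("reason", t.2.2)])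
          (PySem.Dict.empty, [])).1.getD key ("", "", [])).2.1),
         ("reason", PySem.Str.join " " (((xs.map pvItem).foldl (fun acc t => pvAStep acc [("stage", t.1), ("specific_step", t.2.1), ("reason", t.2.2)])
          (PySem.Dict.empty, [])).1.getD key ("", "", [])).2.2)])
      = pvGroups (xs.map pvItem) := by
    unfold pvGroups
    refine List.map_congr_left (fun k hk => ?_)
    have hmem : k ∈ (xs.map pvItem).map pvKey := (pv_mem_dedup _ _).mp hk
    rw [PySem.Dict.getD_eq_get?_getD, h2 k, if_pos hmem]
    rfl
  rw [hmap]
  rfl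

-- insertBy places an element at the end of its priority bucket
lemma pv_insertBy_append {α : Type} (before : α → α → Bool) (x : α) (pre suf : List α)
    (h : ∀ y ∈ pre, before x y = false) :
    PySem.List.insertBy before x (pre ++ suf) = pre ++ PySem.List.insertBy before x suf := by
  induction pre with
  | nil => simp
  | cons y ys ih =>
      simp only [List.cons_append, PySem.List.insertBy]
      rw [h y (by simp), if_neg (by simp)]
      simp [ih (fun y hy => h y (by simp [hy]))]

lemma pv_insertBy_all_before {α : Type} (before : α → α → Bool) (x : α) (suf : List α)
    (h : ∀ y ∈ suf, before x y = true) :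
    PySem.List.insertBy before x suf = x :: suf := by
  cases suf with
  | nil => rfl
  | cons y ys => simp [PySem.List.insertBy, h y (by simp)]

lemma pv_sorted_buckets {α : Type} (L : List α) (κ : α → Int)
    (h : ∀ x ∈ L, 0 ≤ κ x ∧ κ x ≤ 3) :
    PySem.List.sorted L κ false =
      L.filter (fun x => κ x == 0) ++ L.filter (fun x => κ x == 1) ++
      L.filter (fun x => κ x == 2) ++ L.filter (fun x => κ x == 3) := by
  induction L using List.reverseRecOn with
  | nil => rfl
  | append_singleton L x ih =>
      have hL : ∀ y ∈ L, 0 ≤ κ y ∧ κ y ≤ 3 := fun y hy => h y (by simp [hy])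
      have hx := h x (by simp)
      have hmemq : ∀ (q : Int) (y : α), y ∈ L.filter (fun z => κ z == q) → κ y = q := by
        intro q y hy
        have := (List.mem_filter.mp hy).2
        simpa using this
      rw [PySem.List.sorted_eq_foldl_insertBy, List.foldl_append, List.foldl_cons, List.foldl_nil,
        ← PySem.List.sorted_eq_foldl_insertBy, ih hL]
      have hfilt : ∀ q : Int, (L ++ [x]).filter (fun z => κ z == q)
          = L.filter (fun z => κ z == q) ++ (if κ x = q then [x] else []) := by
        intro q
        rw [List.filter_append]
        congr 1
        by_cases hq : κ x = q <;> simp [List.filter_cons, hq]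
      rw [hfilt 0, hfilt 1, hfilt 2, hfilt 3]
      rcases (by omega : κ x = 0 ∨ κ x = 1 ∨ κ x = 2 ∨ κ x = 3) with h0 | h1 | h2 | h3
      · rw [List.append_assoc (L.filter (fun z => κ z == 0)),
          List.append_assoc (L.filter (fun z => κ z == 0))]
        rw [pv_insertBy_append _ _ _ _ (by
          intro y hy; rw [hmemq 0 y hy]; simp [h0])]
        rw [pv_insertBy_all_before _ _ _ (by
          intro y hy
          simp only [List.mem_append] at hy
          rcases hy with (hy | hy) | hy
          · rw [hmemq 1 y hy]; simp [h0]
          · rw [hmemq 2 y hy]; simp [h0]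
          · rw [hmemq 3 y hy]; simp [h0])]
        simp [h0]
      · rw [show L.filter (fun z => κ z == 0) ++ L.filter (fun z => κ z == 1) ++ L.filter (fun z => κ z == 2) ++ L.filter (fun z => κ z == 3)
            = (L.filter (fun z => κ z == 0) ++ L.filter (fun z => κ z == 1)) ++ (L.filter (fun z => κ z == 2) ++ L.filter (fun z => κ z == 3)) from by
          simp [List.append_assoc]]
        rw [pv_insertBy_append _ _ _ _ (by
          intro y hy
          simp only [List.mem_append] at hy
          rcases hy with hy | hy
          · rw [hmemq 0 y hy]; simp [h1]
          · rw [hmemq 1 y hy]; simp [h1])]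
        rw [pv_insertBy_all_before _ _ _ (by
          intro y hy
          simp only [List.mem_append] at hy
          rcases hy with hy | hy
          · rw [hmemq 2 y hy]; simp [h1]
          · rw [hmemq 3 y hy]; simp [h1])]
        simp [h1]
      · rw [show L.filter (fun z => κ z == 0) ++ L.filter (fun z => κ z == 1) ++ L.filter (fun z => κ z == 2) ++ L.filter (fun z => κ z == 3)
            = (L.filter (fun z => κ z == 0) ++ L.filter (fun z => κ z == 1) ++ L.filter (fun z => κ z == 2)) ++ L.filter (fun z => κ z == 3) from by
          simp [List.append_assoc]]
        rw [pv_insertBy_append _ _ _ _ (by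
          intro y hy
          simp only [List.mem_append] at hy
          rcases hy with (hy | hy) | hy
          · rw [hmemq 0 y hy]; simp [h2]
          · rw [hmemq 1 y hy]; simp [h2]
          · rw [hmemq 2 y hy]; simp [h2])]
        rw [pv_insertBy_all_before _ _ _ (by
          intro y hy; rw [hmemq 3 y hy]; simp [h2])]
        simp [h2]
      · rw [PySem.List.insertBy_of_forall_not_before _ _ _ (by
          intro y hy
          simp only [List.mem_append] at hy
          rcases hy with ((hy | hy) | hy) | hy
          · rw [hmemq 0 y hy]; simp [h3]
          · rw [hmemq 1 y hy]; simp [h3]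
          · rw [hmemq 2 y hy]; simp [h3]
          · rw [hmemq 3 y hy]; simp [h3])]
        simp [h3]

lemma pv_bucket_groups (ys : List (String × String × String)) (p : Int) :
    (PySem.List.dedup ((ys.filter (fun t => pvPrio t.1 == p)).map (fun t => (t.1, t.2.1)))).map
      (fun k => [("stage", k.1), ("specific_step", k.2), ("reason", PySem.Str.join " "
        (PySem.List.dedup (((ys.filter (fun t => pvPrio t.1 == p)).filter (fun t => (t.1, t.2.1) == k)).map (fun t => t.2.2))))])
      = (pvGroups ys).filter (fun r => pvKappa r == p) := by
  unfold pvGroups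
  rw [List.filter_map]
  have hcomp : ((fun r => pvKappa r == p) ∘ fun k => pvRec k (pvReasons ys k))
      = fun k : String × String => pvPrio k.1 == p := by
    funext k
    simp [Function.comp, pvKappa_rec]
  rw [hcomp]
  have hkeys : (ys.filter (fun t => pvPrio t.1 == p)).map (fun t : String × String × String => (t.1, t.2.1))
      = (ys.map pvKey).filter (fun k => pvPrio k.1 == p) := by
    rw [List.filter_map]
    rfl
  rw [hkeys, pv_dedup_filter]
  refine List.map_congr_left (fun k hk => ?_)
  have hkp : pvPrio k.1 = p := by
    have := (List.mem_filter.mp hk).2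
    simpa using this
  have hreason : ((ys.filter (fun t => pvPrio t.1 == p)).filter (fun t => (t.1, t.2.1) == k))
      = ys.filter (fun t => pvKey t == k) := by
    rw [List.filter_filter]
    refine List.filter_congr (fun t _ => ?_)
    by_cases hkt : (t.1, t.2.1) = k
    · have ht1 : t.1 = k.1 := by rw [← hkt]
      simp [pvKey, hkt, ht1, hkp]
    · simp [pvKey, hkt]
  rw [hreason]
  rfl

lemma pvB_char (xs : List (List (String × String))) :
    merge_similar_steps_alt xs =
      (pvGroups (xs.map pvItem)).filter (fun r => pvKappa r == 0) ++
      (pvGroups (xs.map pvItem)).filter (fun r => pvKappa r == 1) ++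
      (pvGroups (xs.map pvItem)).filter (fun r => pvKappa r == 2) ++
      (pvGroups (xs.map pvItem)).filter (fun r => pvKappa r == 3) := by
  unfold merge_similar_steps_alt
  have hrange : PySem.List.pyRange 0 (PySem.List.len pvStageOrder + 1) 1 = [0, 1, 2, 3] := by decide
  rw [hrange]
  simp only [List.foldl_cons, List.foldl_nil]
  rw [PySem.List.foldl_append_singleton_eq_map, PySem.List.foldl_append_singleton_eq_map,
    PySem.List.foldl_append_singleton_eq_map, PySem.List.foldl_append_singleton_eq_map]
  rw [List.nil_append]
  rw [show (xs.map fun s => ((PySem.Dict.mk s).getD "stage" "", (PySem.Dict.mk s).getD "specific_step" "",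
      (PySem.Dict.mk s).getD "reason" "")) = xs.map pvItem from rfl]
  rw [pv_bucket_groups (xs.map pvItem) 0, pv_bucket_groups (xs.map pvItem) 1,
    pv_bucket_groups (xs.map pvItem) 2, pv_bucket_groups (xs.map pvItem) 3]

-- ===== VERDICT (by name: the statement is the Claim_ definition above) =====
theorem merge_similar_steps_spec : Claim_equal_merge_similar_steps := by
  intro xs _
  unfold Spec_merge_similar_steps
  rw [pvA_char, pvB_char,
    pv_sorted_buckets (pvGroups (xs.map pvItem)) pvKappa
      (fun x _ => by unfold pvKappa; exact pvPrio_bounds _)]
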